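-- pv_equiv track=rewrite | github.com/leomatt547/Cryptarithmetic | program.py | permutasi
-- ===== SOURCE A (Python) =====
-- def permutasi(lst, n):
--     #Cara Pakai: permutasi([x for x in <listnya>], n)
--     if n == 0:
--         return [[]] #bila 0, return list kosong
--     l = []
--     for i in range(0, len(lst)):
--         m = lst[i]
--         temp = lst[:i] + lst[i+1:]
--         for p in permutasi(temp, n-1): #rekursif
--             l.append([m]+p)
--     li = [[int(j) for j in i] for i in l] #konversi tipe data non-type ke integer
--     return li
-- ===== SOURCE B (Python) =====
-- from itertools import permutations
--
-- def permutasi(lst, n):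
--     if n < 0 or n > len(lst):
--         return []
--     return [[int(x) for x in p] for p in permutations(lst, n)]
-- ===== Notes on version B (the rewrite author's own statement) =====
-- stated objective: idiomatic
-- what changed: Replaces the hand-written recursive generator (slice-and-recurse with an accumulator list and a final int() conversion pass) by a direct call to itertools.permutations, with one guard for n < 0 or n > len(lst), where there are no n-permutations.
import Mathlib
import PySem

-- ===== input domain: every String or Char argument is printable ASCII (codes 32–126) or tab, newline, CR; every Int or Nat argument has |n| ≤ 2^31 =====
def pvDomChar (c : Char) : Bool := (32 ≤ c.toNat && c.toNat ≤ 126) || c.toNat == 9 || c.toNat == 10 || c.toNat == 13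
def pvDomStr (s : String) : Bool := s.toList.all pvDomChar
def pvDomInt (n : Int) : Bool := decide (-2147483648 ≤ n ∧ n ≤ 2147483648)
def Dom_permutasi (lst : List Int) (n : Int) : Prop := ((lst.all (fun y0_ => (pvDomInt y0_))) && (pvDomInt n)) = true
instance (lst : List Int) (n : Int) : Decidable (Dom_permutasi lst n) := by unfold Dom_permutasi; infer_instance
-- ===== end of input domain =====

-- B replaces A's hand-written recursive generator by itertools.permutations (a single guard for n < 0); idiomatic, return value identical.
-- ===== PORT A =====
def permutasi (lst : List Int) (n : Int) : List (List Int) :=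
  if n = 0 then [[]]
  else
    -- l = []; for i in range(0, len(lst)): m = lst[i]; temp = lst[:i] + lst[i+1:]; for p in permutasi(temp, n-1): l.append([m]+p)
    let l := (List.range lst.length).attach.foldl
      (fun l i =>
        let m := lst.getD i.1 0                              -- lst[i]; i < len(lst), so in range (exact)
        let temp := lst.take i.1 ++ lst.drop (i.1 + 1)       -- lst[:i] + lst[i+1:] with 0 ≤ i (exact)
        l ++ (permutasi temp (n - 1)).map (fun p => m :: p))
      []
    -- li = [[int(j) for j in i] for i in l]; int(j) on an int is the identity
    l.map (fun i => i.map (fun j => j))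
termination_by lst.length
decreasing_by
  have hi := List.mem_range.mp i.2
  simp only [List.length_append, List.length_take, List.length_drop]
  omega

-- ===== PORT B =====
def permutasi_alt (lst : List Int) (n : Int) : List (List Int) :=
  if n < 0 ∨ (lst.length : Int) < n then []
  else (PySem.List.permutations lst n.toNat).map (fun p => p.map (fun x => x))

-- ===== PRECONDITION & SPEC =====
def Spec_permutasi (lst : List Int) (n : Int) (out : List (List Int)) : Prop := out = permutasi_alt lst n
instance (lst : List Int) (n : Int) (out : List (List Int)) : Decidable (Spec_permutasi lst n out) := by unfold Spec_permutasi; infer_instance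

-- ===== CLAIM (what is proved, stated in full; the proofs are below) =====
def Claim_equal_permutasi : Prop := ∀ (lst : List Int) (n : Int), Dom_permutasi lst n → Spec_permutasi lst n (permutasi lst n)

-- ===== LEMMAS AND PROOFS =====

lemma permutasi_neg (N : Nat) : ∀ (lst : List Int) (n : Int), lst.length ≤ N → n < 0 →
    permutasi lst n = [] := by
  induction N with
  | zero =>
    intro lst n h hn
    have : lst = [] := List.eq_nil_of_length_eq_zero (by omega)
    subst this
    rw [permutasi]
    simp [if_neg (show ¬ n = 0 by omega)]
  | succ N ih =>
    intro lst n h hn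
    rw [permutasi]
    simp only [if_neg (show ¬ n = 0 by omega)]
    rw [PySem.List.foldl_append_eq_flatMap]
    simp only [List.nil_append, List.map_eq_nil_iff, List.flatMap_eq_nil_iff]
    intro i hi
    have hi' := List.mem_range.mp i.2
    rw [ih _ (n - 1) (by simp only [List.length_append, List.length_take, List.length_drop]; omega)
      (by omega)]

lemma permutations_eq_nil_of_lt (r : Nat) : ∀ (lst : List Int), lst.length < r →
    PySem.List.permutations lst r = [] := by
  induction r with
  | zero => intro lst h; omega
  | succ r ih =>
    intro lst h
    rw [PySem.List.permutations]
    simp only [List.flatMap_eq_nil_iff, List.mem_range]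
    intro i hi
    rw [List.getElem?_eq_getElem hi, ih _ (by rw [List.length_eraseIdx_of_lt hi]; omega)]
    simp

lemma permutasi_nonneg (N : Nat) : ∀ (lst : List Int) (n : Int), lst.length ≤ N → 0 ≤ n →
    permutasi lst n = PySem.List.permutations lst n.toNat := by
  induction N with
  | zero =>
    intro lst n h hn
    have hlst : lst = [] := List.eq_nil_of_length_eq_zero (by omega)
    subst hlst
    by_cases h0 : n = 0
    · subst h0; rw [permutasi]; rfl
    · rw [permutasi]
      simp only [if_neg h0]
      have hk : n.toNat = (n.toNat - 1) + 1 := by omega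
      rw [hk, PySem.List.permutations]
      simp
  | succ N ih =>
    intro lst n h hn
    by_cases h0 : n = 0
    · subst h0; rw [permutasi]; rfl
    · rw [permutasi]
      simp only [if_neg h0]
      rw [PySem.List.foldl_append_eq_flatMap]
      have hk : n.toNat = (n - 1).toNat + 1 := by omega
      rw [hk, PySem.List.permutations]
      simp only [List.nil_append, List.map_flatMap, List.flatMap_subtype, List.unattach_attach]
      apply List.flatMap_congr
      intro i hi
      have hi' := List.mem_range.mp hi
      rw [ih _ (n - 1) (by simp only [List.length_append, List.length_take, List.length_drop]; omega)
        (by omega)]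
      rw [List.getElem?_eq_getElem hi', List.eraseIdx_eq_take_drop_succ,
        List.getD_eq_getElem lst 0 hi']
      simp

-- ===== VERDICT (by name: the statement is the Claim_ definition above) =====
theorem permutasi_spec : Claim_equal_permutasi := by
  intro lst n _
  unfold Spec_permutasi permutasi_alt
  by_cases hn : n < 0
  · simp [hn, permutasi_neg lst.length lst n le_rfl hn]
  · rw [permutasi_nonneg lst.length lst n le_rfl (by omega)]
    by_cases hb : (lst.length : Int) < n
    · rw [if_pos (Or.inr hb), permutations_eq_nil_of_lt n.toNat lst (by omega)]
    · simp [hn, hb]
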